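-- pv_equiv track=rewrite | github.com/mdutton3/lasso | bindings/utils.py | common_prefix
-- ===== SOURCE A (Python) =====
-- def last(x):
--     return x[len(x)-1]
--
-- def common_prefix(x,y):
--     max = min(len(x),len(y))
--     last = 0
--     for i in range(max):
--         if x[i] != y[i]:
--             return min(i,last+1)
--         if x[i] == '_':
--             last = i
--     return max
-- ===== SOURCE B (Python) =====
-- def common_prefix(x, y):
--     m = min(len(x), len(y))
--     i = 0
--     while i < m and x[i] == y[i]:
--         i += 1
--     if i == m:
--         return m
--     j = x.rfind('_', 0, i)
--     return min(i, max(j, 0) + 1)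
-- ===== Notes on version B (the rewrite author's own statement) =====
-- stated objective: alternative
-- what changed: Replaces A's single interleaved forward pass (which tracks the last underscore while comparing) by a divergence-then-backward-search decomposition: first find the first mismatch index, then str.rfind the last underscore before it.
import Mathlib
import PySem

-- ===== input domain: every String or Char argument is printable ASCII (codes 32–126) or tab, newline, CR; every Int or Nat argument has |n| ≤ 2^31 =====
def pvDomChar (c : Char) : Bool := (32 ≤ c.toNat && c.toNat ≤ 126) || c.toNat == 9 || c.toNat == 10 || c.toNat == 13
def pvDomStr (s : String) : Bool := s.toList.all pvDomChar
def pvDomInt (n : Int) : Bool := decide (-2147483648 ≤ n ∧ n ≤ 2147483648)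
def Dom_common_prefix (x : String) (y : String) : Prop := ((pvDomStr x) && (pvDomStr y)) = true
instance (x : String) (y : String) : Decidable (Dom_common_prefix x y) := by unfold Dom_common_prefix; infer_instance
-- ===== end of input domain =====

-- B replaces A's single interleaved forward pass by a divergence-then-backward-search
-- decomposition (find first mismatch, then rfind the last '_' before it); same cost.


-- ===== PORT A =====
-- A's for-loop over range(min(len x, len y)) with indexing, as the obvious structural
-- recursion over the two character lists carrying the same state (i, last).
def loopA : List Char → List Char → Int → Int → Int
  | c :: a, d :: b, i, last =>
      if c ≠ d then min i (last + 1)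
      else loopA a b (i + 1) (if c = '_' then i else last)
  | _, _, i, _ => i   -- loop exhausted: i = max = min(len x, len y)

def common_prefix (x : String) (y : String) : Int :=
  loopA x.toList y.toList 0 0

-- ===== PORT B =====
-- first mismatch position (or min length on full match)
def divIdx : List Char → List Char → Nat
  | c :: a, d :: b => if c = d then divIdx a b + 1 else 0
  | _, _ => 0

-- x.rfind('_') on a list of chars: last index of '_', -1 if absent
def rfindU : List Char → Int
  | [] => -1
  | c :: t =>
      let r := rfindU t
      if r ≥ 0 then r + 1 else if c = '_' then 0 else -1

def common_prefix_alt (x : String) (y : String) : Int :=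
  let xs := x.toList
  let ys := y.toList
  let m := min xs.length ys.length
  let i := divIdx xs ys
  if i = m then (m : Int)
  else min (i : Int) (max (rfindU (xs.take i)) 0 + 1)

-- ===== PRECONDITION & SPEC =====
def Spec_common_prefix (x : String) (y : String) (out : Int) : Prop := out = common_prefix_alt x y
instance (x : String) (y : String) (out : Int) : Decidable (Spec_common_prefix x y out) := by unfold Spec_common_prefix; infer_instance

-- ===== CLAIM (what is proved, stated in full; the proofs are below) =====
def Claim_equal_common_prefix : Prop := ∀ (x : String) (y : String), Dom_common_prefix x y → Spec_common_prefix x y (common_prefix x y)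

-- ===== LEMMAS AND PROOFS =====

-- A's running "last" state, replayed over an already-matched prefix
def lastAcc : List Char → Int → Int → Int
  | [], _, acc => acc
  | c :: t, i, acc => lastAcc t (i + 1) (if c = '_' then i else acc)

theorem lastAcc_rfind (l : List Char) : ∀ (b acc : Int),
    lastAcc l b acc = if rfindU l ≥ 0 then b + rfindU l else acc := by
  induction l with
  | nil => intro b acc; simp [lastAcc, rfindU]
  | cons c t ih =>
      intro b acc
      simp only [lastAcc, rfindU, ih]
      by_cases h : rfindU t ≥ 0
      · simp [h]; omega
      · by_cases hc : c = '_' <;> simp [h, hc]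

theorem loopA_char (a : List Char) : ∀ (b : List Char) (i last : Int),
    loopA a b i last =
      if divIdx a b = min a.length b.length then i + divIdx a b
      else min (i + (divIdx a b : Int)) (lastAcc (a.take (divIdx a b)) i last + 1) := by
  induction a with
  | nil => intro b i last; simp [loopA, divIdx]
  | cons c a ih =>
      intro b i last
      cases b with
      | nil => simp [loopA, divIdx]
      | cons d b =>
          by_cases hcd : c = d
          · have hstep : divIdx (c :: a) (d :: b) = divIdx a b + 1 := by
              simp [divIdx, hcd]
            have hmin : min (c :: a).length (d :: b).length = min a.length b.length + 1 := by
              simp [Nat.succ_min_succ]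
            have hcond : (divIdx (c :: a) (d :: b) = min (c :: a).length (d :: b).length)
                ↔ (divIdx a b = min a.length b.length) := by
              rw [hstep, hmin]; omega
            have htake : (c :: a).take (divIdx (c :: a) (d :: b))
                = c :: a.take (divIdx a b) := by
              rw [hstep]; rfl
            have hloop : loopA (c :: a) (d :: b) i last
                = loopA a b (i + 1) (if c = '_' then i else last) := by
              simp [loopA, hcd]
            rw [hloop, ih]
            by_cases h : divIdx a b = min a.length b.length
            · rw [if_pos h, if_pos (hcond.mpr h), hstep]
              push_cast; ring
            · rw [if_neg h, if_neg (fun hx => h (hcond.mp hx)), htake, hstep]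
              simp only [lastAcc]
              push_cast; ring_nf
          · have h0 : divIdx (c :: a) (d :: b) = 0 := by simp [divIdx, hcd]
            have : min (c :: a).length (d :: b).length ≠ 0 := by
              simp [Nat.succ_min_succ]
            rw [h0, if_neg (by omega)]
            simp [loopA, hcd, lastAcc]

theorem common_prefix_eq (x y : String) : common_prefix x y = common_prefix_alt x y := by
  unfold common_prefix common_prefix_alt
  rw [loopA_char]
  set xs := x.toList
  set ys := y.toList
  by_cases h : divIdx xs ys = min xs.length ys.length
  · simp [h]
  · rw [if_neg h]
    simp only [h, if_false]
    rw [lastAcc_rfind]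
    by_cases hr : rfindU (xs.take (divIdx xs ys)) ≥ 0
    · rw [if_pos hr]; omega
    · rw [if_neg hr]; omega

-- ===== VERDICT (by name: the statement is the Claim_ definition above) =====
theorem common_prefix_spec : Claim_equal_common_prefix := by
  intro x y _
  unfold Spec_common_prefix
  exact common_prefix_eq x y
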